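-- pv_equiv track=rewrite | github.com/danieli1818/bacon-distance | bacondistance/scripts/generate_db.py | get_actors_co_appearances_counts
-- ===== SOURCE A (Python) =====
-- import itertools
-- from collections import defaultdict
-- from collections.abc import Iterable, Mapping
--
-- def get_actors_co_appearances_counts(
--     titles_names_to_workers_names: Mapping[str, set[str]],
-- ) -> dict[str, dict[str, int]]:
--     """Computes the number of shared appearances between workers (actors).
--
--     For each worker, returns a dictionary mapping other workers to the count
--     of titles they have appeared in together.
--
--     Args:
--         titles_names_to_workers_names (Mapping[str, Set[str]]): Mapping from title
--             names to sets of worker (actor) names associated with each title.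
--
--     Returns:
--         Dict[str, Dict[str, int]]: A nested dictionary where the first key is a
--             worker's name, and the value is another dictionary mapping coworker
--             names to the count of shared appearances.
--     """
--     workers_to_coworkers_counts: defaultdict[str, defaultdict[str, int]] = defaultdict(
--         lambda: defaultdict(int)
--     )
--     for workers_names in titles_names_to_workers_names.values():
--         if len(workers_names) == 1:
--             solo_actor = next(iter(workers_names))
--             workers_to_coworkers_counts.setdefault(solo_actor, defaultdict(int))
--         else:
--             for worker1_name, worker2_name in itertools.combinations(workers_names, 2):
--                 workers_to_coworkers_counts[worker1_name][worker2_name] += 1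
--                 workers_to_coworkers_counts[worker2_name][worker1_name] += 1
--     return {
--         worker: dict(coworkers)
--         for worker, coworkers in workers_to_coworkers_counts.items()
--     }
-- ===== SOURCE B (Python) =====
-- def get_actors_co_appearances_counts(titles_names_to_workers_names):
--     """Inverted-index re-implementation: first build a map from each worker to
--     the list of casts containing them, then build each worker's count row from
--     its own casts only."""
--     casts_of = {}
--     for cast in titles_names_to_workers_names.values():
--         for w in cast:
--             casts_of.setdefault(w, []).append(cast)
--     result = {}
--     for w, casts in casts_of.items():
--         row = {}
--         for cast in casts:
--             for o in cast:
--                 if o != w: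
--                     row[o] = row.get(o, 0) + 1
--         result[w] = row
--     return result
-- ===== Notes on version B (the rewrite author's own statement) =====
-- stated objective: alternative
-- what changed: Instead of A's single pass that streams itertools.combinations of each title's cast into a nested defaultdict with symmetric increments and a len==1 solo branch, B transposes the computation: a first pass builds an inverted index from each worker to the list of casts containing them, and a second pass builds each worker's count row independently from its own casts only.
import Mathlib
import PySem

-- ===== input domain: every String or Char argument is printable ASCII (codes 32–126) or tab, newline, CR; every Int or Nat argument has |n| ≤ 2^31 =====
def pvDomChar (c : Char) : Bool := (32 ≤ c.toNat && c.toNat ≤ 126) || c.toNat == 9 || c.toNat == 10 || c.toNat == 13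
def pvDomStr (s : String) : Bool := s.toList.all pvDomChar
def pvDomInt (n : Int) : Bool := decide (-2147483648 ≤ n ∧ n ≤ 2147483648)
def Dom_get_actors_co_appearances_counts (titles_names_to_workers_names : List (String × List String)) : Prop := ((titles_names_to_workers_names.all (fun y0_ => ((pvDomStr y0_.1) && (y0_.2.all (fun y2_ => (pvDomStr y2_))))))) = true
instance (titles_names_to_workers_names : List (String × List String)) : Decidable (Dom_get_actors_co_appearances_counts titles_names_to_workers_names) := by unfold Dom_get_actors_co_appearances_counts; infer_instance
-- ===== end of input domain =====

-- B transposes A's traversal: a first pass builds an inverted index worker -> casts containing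
-- them, a second pass builds each worker's count row independently from its own casts
-- (objective: alternative; no combinations, no solo branch, no nested defaultdict).
-- The Python argument is a Mapping[str, set[str]]; per the type convention each set is the list
-- of its DISTINCT elements, and the dicts returned are compared ignoring order.

-- ===== PORT A =====
def get_actors_co_appearances_counts (titles_names_to_workers_names : List (String × List String)) : List (String × List (String × Int)) :=
  let final : PySem.Dict String (PySem.Dict String Int) :=
    titles_names_to_workers_names.foldl (fun acc p =>
      let workers_names := p.2
      if workers_names.length == 1 then
        -- next(iter(workers_names)) is the single element; headD's default is unreachable
        acc.setdefault (workers_names.headD "") PySem.Dict.empty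
      else
        (PySem.List.combinations workers_names 2).foldl (fun acc c =>
          match c with
          | [worker1_name, worker2_name] =>
            -- defaultdict access + '+= 1' at both levels is Dict.modify with the default
            let acc1 := acc.modify worker1_name PySem.Dict.empty (fun m => m.modify worker2_name 0 (· + 1))
            acc1.modify worker2_name PySem.Dict.empty (fun m => m.modify worker1_name 0 (· + 1))
          | _ => acc) acc)
      PySem.Dict.empty
  final.items.map (fun p => (p.1, p.2.items))

-- ===== PORT B =====
def get_actors_co_appearances_counts_alt (titles_names_to_workers_names : List (String × List String)) : List (String × List (String × Int)) :=
  -- pass 1: inverted index worker -> list of casts containing them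
  -- ('.setdefault(w, []).append(cast)' appends in place: Dict.modify with default [])
  let casts_of : PySem.Dict String (List (List String)) :=
    titles_names_to_workers_names.foldl (fun casts_of p =>
      p.2.foldl (fun casts_of w => casts_of.modify w [] (fun cs => cs ++ [p.2])) casts_of)
      PySem.Dict.empty
  -- pass 2: one row per worker, from its own casts only
  let result : PySem.Dict String (PySem.Dict String Int) :=
    casts_of.items.foldl (fun result q =>
      let row : PySem.Dict String Int :=
        q.2.foldl (fun row cast =>
          cast.foldl (fun row o => if o ≠ q.1 then row.insert o (row.getD o 0 + 1) else row) row)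
          PySem.Dict.empty
      result.insert q.1 row) PySem.Dict.empty
  result.items.map (fun p => (p.1, p.2.items))

-- ===== PRECONDITION & SPEC =====
-- The Python argument maps titles to SETS of names: a worker list with duplicate entries
-- represents no Python input (a set has distinct elements), so Pre_ excludes it.
def Pre_get_actors_co_appearances_counts (titles_names_to_workers_names : List (String × List String)) : Prop :=
  ∀ p ∈ titles_names_to_workers_names, p.2.Nodup
instance (titles_names_to_workers_names : List (String × List String)) : Decidable (Pre_get_actors_co_appearances_counts titles_names_to_workers_names) := by unfold Pre_get_actors_co_appearances_counts; infer_instance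
def pvWitness_get_actors_co_appearances_counts : (List (String × List String)) :=
  [("t", ["a", "b", "c"]), ("s", ["a"]), ("u", [])]
def Spec_get_actors_co_appearances_counts (titles_names_to_workers_names : List (String × List String)) (out : List (String × List (String × Int))) : Prop := out = get_actors_co_appearances_counts_alt titles_names_to_workers_names
instance (titles_names_to_workers_names : List (String × List String)) (out : List (String × List (String × Int))) : Decidable (Spec_get_actors_co_appearances_counts titles_names_to_workers_names out) := by unfold Spec_get_actors_co_appearances_counts; infer_instance

-- ===== CLAIM (what is proved, stated in full; the proofs are below) =====
def Claim_equal_get_actors_co_appearances_counts : Prop := ∀ (titles_names_to_workers_names : List (String × List String)), Dom_get_actors_co_appearances_counts titles_names_to_workers_names → Pre_get_actors_co_appearances_counts titles_names_to_workers_names → Spec_get_actors_co_appearances_counts titles_names_to_workers_names (get_actors_co_appearances_counts titles_names_to_workers_names)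

-- ===== LEMMAS AND PROOFS =====

abbrev PvO := PySem.Dict String (PySem.Dict String Int)
abbrev PvI := PySem.Dict String Int

def pvInc (d : PvO) (w o : String) : PvO :=
  d.modify w PySem.Dict.empty (fun m => m.modify o 0 (· + 1))

def pvPairs (l : List (String × String)) (d : PvO) : PvO :=
  l.foldl (fun d pr => pvInc (pvInc d pr.1 pr.2) pr.2 pr.1) d

def pvCombos2 : List String → List (String × String)
  | [] => []
  | x :: xs => (xs.map (fun y => (x, y))) ++ pvCombos2 xs

def pvInner (m : PvI) (l : List String) : PvI :=
  l.foldl (fun m o => m.modify o 0 (· + 1)) m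

def pvStepA (d : PvO) (ws : List String) : PvO :=
  if ws.length == 1 then d.setdefault (ws.headD "") PySem.Dict.empty
  else pvPairs (pvCombos2 ws) d

-- the per-title update of worker k's row, as A's step leaves it
def pvRowStep (k : String) (m : PvI) (ws : List String) : PvI :=
  if k ∈ ws then pvInner m (ws.filter (fun o => o ≠ k)) else m

def pvRow (k : String) (ts : List (String × List String)) : PvI :=
  ts.foldl (fun m p => pvRowStep k m p.2) PySem.Dict.empty

def pvWorkers (ts : List (String × List String)) : List String :=
  ts.foldl (fun s p => PySem.Set.update s p.2) []

theorem pvCombos2_spec (xs : List String) :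
    PySem.List.combinations xs 2 = (pvCombos2 xs).map (fun pr => [pr.1, pr.2]) := by
  induction xs with
  | nil => rfl
  | cons x t ih =>
      simp [PySem.List.combinations_cons_succ, PySem.List.combinations_one, pvCombos2, ih,
        List.map_map, Function.comp]

theorem pvInsert_eq_modify (m : PvI) (o : String) :
    m.insert o (m.getD o 0 + 1) = m.modify o 0 (· + 1) := rfl

theorem portA_foldl (t : List (String × List String)) :
    get_actors_co_appearances_counts t
      = (t.foldl (fun d p => pvStepA d p.2) PySem.Dict.empty).items.map (fun p => (p.1, p.2.items)) := by
  simp only [get_actors_co_appearances_counts]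
  refine congrArg _ (congrArg _ (PySem.List.foldl_congr_mem _ _ _ _ ?_))
  intro acc p _
  simp only [pvStepA, pvPairs, pvCombos2_spec, List.foldl_map, pvInc]

-- getD characterizations of A's step

theorem getD_pvInc (d : PvO) (w o k : String) :
    (pvInc d w o).getD k PySem.Dict.empty
      = if k = w then (d.getD w PySem.Dict.empty).modify o 0 (· + 1)
        else d.getD k PySem.Dict.empty := by
  simp [pvInc, PySem.Dict.getD_modify]

theorem pvInner_cons (m : PvI) (y : String) (l : List String) :
    pvInner m (y :: l) = pvInner (m.modify y 0 (· + 1)) l := rfl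

theorem getD_pvP1 (x : String) (xs : List String) (d : PvO) (k : String)
    (hx : x ∉ xs) (hn : xs.Nodup) :
    (xs.foldl (fun d y => pvInc (pvInc d x y) y x) d).getD k PySem.Dict.empty
      = if k = x then pvInner (d.getD x PySem.Dict.empty) xs
        else if k ∈ xs then (d.getD k PySem.Dict.empty).modify x 0 (· + 1)
        else d.getD k PySem.Dict.empty := by
  induction xs generalizing d with
  | nil =>
      by_cases h : k = x
      · subst h; simp [pvInner]
      · simp [h]
  | cons y t ih =>
      have hxy : x ≠ y := fun h => hx (by simp [h])
      have hx' : x ∉ t := fun h => hx (List.mem_cons_of_mem _ h)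
      have hyt : y ∉ t := (List.nodup_cons.mp hn).1
      have hn' : t.Nodup := (List.nodup_cons.mp hn).2
      simp only [List.foldl_cons]
      rw [ih _ hx' hn']
      have hdx : (pvInc (pvInc d x y) y x).getD x PySem.Dict.empty
          = (d.getD x PySem.Dict.empty).modify y 0 (· + 1) := by
        rw [getD_pvInc, if_neg hxy, getD_pvInc, if_pos rfl]
      have hdy : (pvInc (pvInc d x y) y x).getD y PySem.Dict.empty
          = (d.getD y PySem.Dict.empty).modify x 0 (· + 1) := by
        rw [getD_pvInc, if_pos rfl, getD_pvInc, if_neg (Ne.symm hxy)]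
      by_cases hkx : k = x
      · subst hkx
        rw [if_pos rfl, if_pos rfl, hdx, pvInner_cons]
      · rw [if_neg hkx, if_neg hkx]
        by_cases hky : k = y
        · subst hky
          rw [if_neg (by simpa using hyt), if_pos (by simp), hdy]
        · have hdk : (pvInc (pvInc d x y) y x).getD k PySem.Dict.empty
              = d.getD k PySem.Dict.empty := by
            rw [getD_pvInc, if_neg hky, getD_pvInc, if_neg hkx]
          by_cases hkt : k ∈ t
          · rw [if_pos hkt, if_pos (by simp [hkt]), hdk]
          · rw [if_neg hkt, if_neg (by simp [hky, hkt]), hdk]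

theorem pvPairs_append (a b : List (String × String)) (d : PvO) :
    pvPairs (a ++ b) d = pvPairs b (pvPairs a d) := List.foldl_append ..

theorem pvInner_filter_of_not_mem (t : List String) (x : String) (hx : x ∉ t) :
    t.filter (fun o => o ≠ x) = t :=
  List.filter_eq_self.mpr (fun a ha => by simp; exact fun h => hx (h ▸ ha))

theorem getD_pvPairs_combos (xs : List String) (d : PvO) (k : String) (hn : xs.Nodup) :
    (pvPairs (pvCombos2 xs) d).getD k PySem.Dict.empty
      = if k ∈ xs then pvInner (d.getD k PySem.Dict.empty) (xs.filter (fun o => o ≠ k))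
        else d.getD k PySem.Dict.empty := by
  induction xs generalizing d with
  | nil => simp [pvCombos2, pvPairs]
  | cons x t ih =>
      have hxt : x ∉ t := (List.nodup_cons.mp hn).1
      have hn' : t.Nodup := (List.nodup_cons.mp hn).2
      have hmap : pvPairs (t.map fun y => (x, y)) d
          = t.foldl (fun d y => pvInc (pvInc d x y) y x) d := by
        simp [pvPairs, List.foldl_map]
      rw [show pvCombos2 (x :: t) = (t.map (fun y => (x, y))) ++ pvCombos2 t from rfl,
        pvPairs_append, hmap, ih _ hn']
      have hP1 : ∀ j, (t.foldl (fun d y => pvInc (pvInc d x y) y x) d).getD j PySem.Dict.empty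
          = if j = x then pvInner (d.getD x PySem.Dict.empty) t
            else if j ∈ t then (d.getD j PySem.Dict.empty).modify x 0 (· + 1)
            else d.getD j PySem.Dict.empty := fun j => getD_pvP1 x t d j hxt hn'
      by_cases hkx : k = x
      · subst hkx
        rw [if_neg (by simpa using hxt), hP1 k, if_pos rfl, if_pos (by simp)]
        rw [show (k :: t).filter (fun o => o ≠ k) = t.filter (fun o => o ≠ k) by simp,
          pvInner_filter_of_not_mem t k hxt]
      · by_cases hkt : k ∈ t
        · rw [if_pos hkt, hP1 k, if_neg hkx, if_pos hkt, if_pos (by simp [hkt]),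
            show (x :: t).filter (fun o => o ≠ k) = x :: t.filter (fun o => o ≠ k) by
              simp [Ne.symm hkx], pvInner_cons]
        · rw [if_neg hkt, hP1 k, if_neg hkx, if_neg hkt, if_neg (by simp [hkx, hkt])]

theorem getD_pvStepA (ws : List String) (d : PvO) (k : String) (hn : ws.Nodup) :
    (pvStepA d ws).getD k PySem.Dict.empty = pvRowStep k (d.getD k PySem.Dict.empty) ws := by
  match ws with
  | [] => simp [pvStepA, pvCombos2, pvPairs, pvRowStep]
  | [a] =>
      rw [show pvStepA d [a] = d.setdefault a PySem.Dict.empty from by simp [pvStepA]]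
      by_cases hka : k = a
      · subst hka
        rw [PySem.Dict.getD_setdefault_self, pvRowStep, if_pos (by simp)]
        simp [pvInner]
      · rw [pvRowStep, if_neg (by simp [hka]), PySem.Dict.getD_eq_get?_getD,
          PySem.Dict.get?_setdefault_of_ne _ _ hka, ← PySem.Dict.getD_eq_get?_getD]
  | x :: y :: t =>
      rw [show pvStepA d (x :: y :: t) = pvPairs (pvCombos2 (x :: y :: t)) d from by
        simp [pvStepA], pvRowStep]
      exact getD_pvPairs_combos _ d k hn

-- keys characterizations of A's step

theorem keys_modify_add (d : PvO) (k : String) (f : PvI → PvI) :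
    (d.modify k PySem.Dict.empty f).keys = PySem.Set.add d.keys k := by
  rw [PySem.Dict.keys_modify, PySem.Set.add_eq_ite]
  by_cases h : k ∈ d.keys
  · rw [PySem.Dict.keys_insert_of_contains _ _ (by
      rw [PySem.Dict.contains_eq_decide_mem_keys]; simpa), if_pos h]
  · rw [PySem.Dict.keys_insert_of_not_contains _ _ (by
      rw [PySem.Dict.contains_eq_decide_mem_keys]; simpa), if_neg h]

theorem keys_setdefault_add (d : PvO) (k : String) :
    (d.setdefault k PySem.Dict.empty).keys = PySem.Set.add d.keys k := by
  rw [PySem.Dict.keys_setdefault, PySem.Set.add_eq_ite, PySem.Dict.contains_eq_decide_mem_keys]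
  by_cases h : k ∈ d.keys
  · simp [h]
  · simp [h]

theorem keys_pvPairs (l : List (String × String)) (d : PvO) :
    (pvPairs l d).keys = PySem.Set.update d.keys (l.flatMap (fun pr => [pr.1, pr.2])) := by
  induction l generalizing d with
  | nil => rfl
  | cons pr t ih =>
      rw [show pvPairs (pr :: t) d = pvPairs t (pvInc (pvInc d pr.1 pr.2) pr.2 pr.1) from rfl, ih]
      rw [show ((pr :: t).flatMap (fun pr => [pr.1, pr.2]))
          = pr.1 :: pr.2 :: t.flatMap (fun pr => [pr.1, pr.2]) from rfl,
        PySem.Set.update_cons, PySem.Set.update_cons]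
      simp only [pvInc, keys_modify_add]

theorem pvUpdate_of_forall_mem (l : List String) (s : PySem.Set String)
    (h : ∀ a ∈ l, a ∈ s) : PySem.Set.update s l = s := by
  induction l generalizing s with
  | nil => rfl
  | cons a t ih =>
      rw [PySem.Set.update_cons, PySem.Set.add_of_mem (h a (by simp))]
      exact ih s (fun b hb => h b (by simp [hb]))

theorem pvFlat_update (xs : List String) (x : String) (s : PySem.Set String) (hne : xs ≠ []) :
    PySem.Set.update s (xs.flatMap (fun y => [x, y]))
      = PySem.Set.update (PySem.Set.add s x) xs := by
  induction xs generalizing s with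
  | nil => exact absurd rfl hne
  | cons y t ih =>
      rw [show ((y :: t).flatMap (fun y => [x, y])) = x :: y :: t.flatMap (fun y => [x, y])
          from rfl, PySem.Set.update_cons, PySem.Set.update_cons]
      rcases t with _ | ⟨z, t'⟩
      · rfl
      · rw [ih _ (by simp), PySem.Set.update_cons (PySem.Set.add s x) y,
          show PySem.Set.add ((PySem.Set.add s x).add y) x = (PySem.Set.add s x).add y from
            PySem.Set.add_of_mem (by rw [PySem.Set.mem_add]; exact Or.inl (by
              rw [PySem.Set.mem_add]; exact Or.inr rfl))]

theorem mem_pvCombos2 (l : List String) (pr : String × String) (h : pr ∈ pvCombos2 l) :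
    pr.1 ∈ l ∧ pr.2 ∈ l := by
  induction l with
  | nil => cases h
  | cons x t ih =>
      rw [show pvCombos2 (x :: t) = (t.map (fun y => (x, y))) ++ pvCombos2 t from rfl] at h
      rcases List.mem_append.mp h with h1 | h2
      · obtain ⟨y, hy, rfl⟩ := List.mem_map.mp h1
        exact ⟨by simp, by simp [hy]⟩
      · exact ⟨List.mem_cons_of_mem _ (ih h2).1, List.mem_cons_of_mem _ (ih h2).2⟩

theorem keys_pvStepA (ws : List String) (d : PvO) :
    (pvStepA d ws).keys = PySem.Set.update d.keys ws := by
  match ws with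
  | [] => rfl
  | [a] =>
      rw [show pvStepA d [a] = d.setdefault a PySem.Dict.empty from by simp [pvStepA],
        keys_setdefault_add, PySem.Set.update_cons]
      rfl
  | x :: y :: t =>
      rw [show pvStepA d (x :: y :: t) = pvPairs (pvCombos2 (x :: y :: t)) d from by
        simp [pvStepA], keys_pvPairs]
      rw [show pvCombos2 (x :: y :: t) = ((y :: t).map (fun z => (x, z))) ++ pvCombos2 (y :: t)
          from rfl, List.flatMap_append]
      rw [show (((y :: t).map (fun z => (x, z))).flatMap (fun pr => [pr.1, pr.2]))
          = (y :: t).flatMap (fun z => [x, z]) from by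
        simp [List.flatMap_def, List.map_map, Function.comp_def]]
      rw [PySem.Set.update_append, pvFlat_update _ _ _ (by simp)]
      rw [pvUpdate_of_forall_mem _ _ (fun a ha => by
        obtain ⟨pr, hpr, hmem⟩ := List.mem_flatMap.mp ha
        have h2 := mem_pvCombos2 _ _ hpr
        rw [PySem.Set.mem_update]
        simp only [List.mem_cons, List.not_mem_nil, or_false] at hmem
        rcases hmem with h | h
        · exact Or.inr (by rw [h]; exact h2.1)
        · exact Or.inr (by rw [h]; exact h2.2))]
      simp only [PySem.Set.update_cons]

-- A's whole fold, key by key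

theorem keys_foldA (ts : List (String × List String)) (d : PvO) :
    (ts.foldl (fun d p => pvStepA d p.2) d).keys
      = ts.foldl (fun s p => PySem.Set.update s p.2) d.keys := by
  induction ts generalizing d with
  | nil => rfl
  | cons p t ih => rw [List.foldl_cons, List.foldl_cons, ih, keys_pvStepA]

theorem getD_foldA (ts : List (String × List String)) (d : PvO) (k : String)
    (hpre : ∀ p ∈ ts, p.2.Nodup) :
    (ts.foldl (fun d p => pvStepA d p.2) d).getD k PySem.Dict.empty
      = ts.foldl (fun m p => pvRowStep k m p.2) (d.getD k PySem.Dict.empty) := by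
  induction ts generalizing d with
  | nil => rfl
  | cons p t ih =>
      rw [List.foldl_cons, List.foldl_cons, ih _ (fun q hq => hpre q (by simp [hq])),
        getD_pvStepA _ _ _ (hpre p (by simp))]

-- B's structure

def pvStream (ts : List (String × List String)) : List (String × List String) :=
  ts.flatMap (fun p => p.2.map (fun w => (w, p.2)))

theorem pvGuard_fold (cast : List String) (w : String) (row : PvI) :
    cast.foldl (fun row o => if o ≠ w then row.insert o (row.getD o 0 + 1) else row) row
      = pvInner row (cast.filter (fun o => o ≠ w)) := by
  induction cast generalizing row with
  | nil => rfl
  | cons o t ih =>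
      by_cases h : o = w
      · subst h
        rw [List.foldl_cons, if_neg (by simp),
          show (o :: t).filter (fun x => x ≠ o) = t.filter (fun x => x ≠ o) by simp, ih]
      · rw [List.foldl_cons, if_pos (by simpa using h),
          show (o :: t).filter (fun x => x ≠ w) = o :: t.filter (fun x => x ≠ w) by simp [h],
          pvInner_cons, pvInsert_eq_modify, ih]

theorem pvUpdate_flat (ts : List (String × List String)) (s : PySem.Set String) :
    ts.foldl (fun s p => PySem.Set.update s p.2) s
      = PySem.Set.update s (ts.flatMap (fun p => p.2)) := by
  induction ts generalizing s with
  | nil => rfl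
  | cons p t ih => rw [List.foldl_cons, ih, List.flatMap_cons, PySem.Set.update_append]

theorem pvNodup_workers (ts : List (String × List String)) : (pvWorkers ts).Nodup := by
  rw [pvWorkers, pvUpdate_flat]
  exact PySem.Set.nodup_update _ _ List.nodup_nil

theorem pvStream_foldl (ts : List (String × List String)) :
    (ts.foldl (fun d p =>
        p.2.foldl (fun d w => d.modify w [] (fun cs => cs ++ [p.2])) d) PySem.Dict.empty)
      = (pvStream ts).foldl (fun d pr => d.modify pr.1 [] (fun cs => cs ++ [pr.2]))
          PySem.Dict.empty := by
  rw [pvStream, List.foldl_flatMap]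
  refine PySem.List.foldl_congr_mem _ _ _ _ (fun d p _ => ?_)
  rw [List.foldl_map]

theorem pvStream_map_fst (ts : List (String × List String)) :
    (pvStream ts).map (fun pr => pr.1) = ts.flatMap (fun p => p.2) := by
  rw [pvStream, List.map_flatMap]
  simp [List.map_map, Function.comp_def]

theorem pvSegFilter (w : String) (c : List String) (l : List String) (hn : l.Nodup) :
    (l.map (fun v => (v, c))).filter (fun pr => pr.1 == w)
      = if w ∈ l then [(w, c)] else [] := by
  induction l with
  | nil => rfl
  | cons v t ih =>
      have hvt : v ∉ t := (List.nodup_cons.mp hn).1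
      have hn' : t.Nodup := (List.nodup_cons.mp hn).2
      by_cases hvw : v = w
      · subst hvw
        rw [List.map_cons, List.filter_cons_of_pos (by simp), ih hn',
          if_neg hvt, if_pos (by simp)]
      · rw [List.map_cons, List.filter_cons_of_neg (by simp [hvw]), ih hn']
        by_cases h : w ∈ t
        · rw [if_pos h, if_pos (by simp [h])]
        · rw [if_neg h, if_neg (by
            intro hmem
            rcases List.mem_cons.mp hmem with h1 | h2
            · exact hvw h1.symm
            · exact h h2)]

theorem pvStream_filter (ts : List (String × List String)) (w : String)
    (hpre : ∀ p ∈ ts, p.2.Nodup) :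
    ((pvStream ts).filter (fun pr => pr.1 == w)).map (fun pr => pr.2)
      = (ts.filter (fun p => decide (w ∈ p.2))).map (fun p => p.2) := by
  induction ts with
  | nil => rfl
  | cons p t ih =>
      rw [pvStream, List.flatMap_cons, List.filter_append, List.map_append,
        show (t.flatMap (fun p => p.2.map (fun w => (w, p.2)))) = pvStream t from rfl,
        ih (fun q hq => hpre q (by simp [hq])),
        pvSegFilter w p.2 p.2 (hpre p (by simp))]
      by_cases h : w ∈ p.2
      · rw [if_pos h, show (p :: t).filter (fun q => decide (w ∈ q.2))
            = p :: t.filter (fun q => decide (w ∈ q.2)) by simp [h]]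
        rfl
      · rw [if_neg h, show (p :: t).filter (fun q => decide (w ∈ q.2))
            = t.filter (fun q => decide (w ∈ q.2)) by simp [h]]
        rfl

theorem pvRow_filter (k : String) (ts : List (String × List String)) (m : PvI) :
    ts.foldl (fun m p => pvRowStep k m p.2) m
      = ((ts.filter (fun p => decide (k ∈ p.2))).map (fun p => p.2)).foldl
          (fun m cast => pvInner m (cast.filter (fun o => o ≠ k))) m := by
  induction ts generalizing m with
  | nil => rfl
  | cons p t ih =>
      rw [List.foldl_cons, pvRowStep]
      by_cases h : k ∈ p.2
      · rw [if_pos h, show (p :: t).filter (fun q => decide (k ∈ q.2))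
            = p :: t.filter (fun q => decide (k ∈ q.2)) by simp [h],
          List.map_cons, List.foldl_cons, ih]
      · rw [if_neg h, show (p :: t).filter (fun q => decide (k ∈ q.2))
            = t.filter (fun q => decide (k ∈ q.2)) by simp [h], ih]

theorem portB_shape (t : List (String × List String))
    (hpre : ∀ p ∈ t, p.2.Nodup) :
    get_actors_co_appearances_counts_alt t
      = (pvWorkers t).map (fun w => (w, (pvRow w t).items)) := by
  simp only [get_actors_co_appearances_counts_alt, pvStream_foldl]
  -- the inverted index, key by key
  have hkeys := PySem.Dict.keys_foldl_modify_key (pvStream t) (fun pr => pr.1) []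
    (fun _ pr cs => cs ++ [pr.2]) PySem.Dict.empty
  beta_reduce at hkeys
  rw [PySem.Dict.keys_empty, pvStream_map_fst] at hkeys
  have hwork : (PySem.Set.update [] (t.flatMap (fun p => p.2))) = pvWorkers t :=
    (pvUpdate_flat t []).symm
  have hnd : ((pvStream t).foldl (fun d pr => d.modify pr.1 [] (fun cs => cs ++ [pr.2]))
      PySem.Dict.empty).keys.Nodup := by
    rw [hkeys, hwork]; exact pvNodup_workers t
  have hgetD : ∀ w, ((pvStream t).foldl (fun d pr => d.modify pr.1 [] (fun cs => cs ++ [pr.2]))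
      PySem.Dict.empty).getD w []
        = (t.filter (fun p => decide (w ∈ p.2))).map (fun p => p.2) := fun w => by
    have h := PySem.Dict.getD_foldl_modify_append (pvStream t) PySem.Dict.empty w
    beta_reduce at h
    rw [h, PySem.Dict.getD_empty, List.nil_append, pvStream_filter t w hpre]
  rw [PySem.Dict.items_eq_map_keys _ hnd [], hkeys, hwork, List.foldl_map]
  -- every row equals pvRow of its worker
  rw [show ((pvWorkers t).foldl (fun result w =>
      result.insert w ((((pvStream t).foldl
          (fun d pr => d.modify pr.1 [] (fun cs => cs ++ [pr.2])) PySem.Dict.empty).getD w []).foldl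
        (fun row cast =>
          cast.foldl (fun row o => if o ≠ w then row.insert o (row.getD o 0 + 1) else row) row)
        PySem.Dict.empty)) PySem.Dict.empty)
      = (pvWorkers t).foldl (fun result w => result.insert w (pvRow w t)) PySem.Dict.empty from
    PySem.List.foldl_congr_mem _ _ _ _ (fun d w _ => by
      rw [hgetD w, show ∀ (cs : List (List String)) (r : PvI), cs.foldl (fun row cast =>
          cast.foldl (fun row o => if o ≠ w then row.insert o (row.getD o 0 + 1) else row) row) r
            = cs.foldl (fun m cast => pvInner m (cast.filter (fun o => o ≠ w))) r from
          fun cs => by induction cs with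
            | nil => exact fun r => rfl
            | cons c cs ih => exact fun r => by rw [List.foldl_cons, List.foldl_cons,
                pvGuard_fold, ih],
        ← pvRow_filter w t, pvRow])]
  have h := PySem.Dict.items_foldl_insert_fresh (pvWorkers t) (fun w => w)
    (fun w => pvRow w t) PySem.Dict.empty
    (fun a _ => PySem.Dict.contains_empty a) (by simpa using pvNodup_workers t)
  beta_reduce at h
  rw [h]
  simp [Function.comp_def, PySem.Dict.empty]

-- ===== VERDICT (by name: the statement is the Claim_ definition above) =====
theorem get_actors_co_appearances_counts_spec : Claim_equal_get_actors_co_appearances_counts := by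
  intro t _ hpre
  unfold Spec_get_actors_co_appearances_counts
  rw [portA_foldl, portB_shape t hpre]
  have hnd : (t.foldl (fun d p => pvStepA d p.2) PySem.Dict.empty).keys.Nodup := by
    rw [keys_foldA, PySem.Dict.keys_empty]
    exact pvNodup_workers t
  rw [PySem.Dict.items_eq_map_keys _ hnd PySem.Dict.empty, List.map_map, keys_foldA,
    PySem.Dict.keys_empty]
  refine List.map_congr_left (fun k _ => ?_)
  simp only [Function.comp]
  rw [getD_foldA t PySem.Dict.empty k hpre, PySem.Dict.getD_empty, pvRow]
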